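-- pv_equiv track=rewrite | github.com/carlHandy/tinyproxy | tools/nginx-migrate.py | upstream_name
-- ===== SOURCE A (Python) =====
-- def upstream_name(proxy_pass):
--     u = proxy_pass
--     for prefix in ("http://", "https://"):
--         if u.startswith(prefix):
--             u = u[len(prefix):]
--             break
--     if ":" not in u and "/" not in u and u:
--         return u
--     return ""
-- ===== SOURCE B (Python) =====
-- def upstream_name(proxy_pass):
--     # Back-to-front: cut at the last ':' or '/'; the tail is then automatically
--     # free of ':' and '/', so it is the host iff it is nonempty and everything
--     # before the cut is exactly an allowed scheme prefix (or nothing).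
--     cut = max(proxy_pass.rfind(":"), proxy_pass.rfind("/")) + 1
--     host = proxy_pass[cut:]
--     return host if host and proxy_pass[:cut] in ("", "http://", "https://") else ""
-- ===== Notes on version B (the rewrite author's own statement) =====
-- stated objective: alternative
-- what changed: Instead of A's forward scheme-prefix strip followed by two substring membership scans, B splits the string at the LAST ':' or '/' (rfind) and returns the tail iff it is nonempty and the removed prefix is exactly '', 'http://' or 'https://'.
import Mathlib
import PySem

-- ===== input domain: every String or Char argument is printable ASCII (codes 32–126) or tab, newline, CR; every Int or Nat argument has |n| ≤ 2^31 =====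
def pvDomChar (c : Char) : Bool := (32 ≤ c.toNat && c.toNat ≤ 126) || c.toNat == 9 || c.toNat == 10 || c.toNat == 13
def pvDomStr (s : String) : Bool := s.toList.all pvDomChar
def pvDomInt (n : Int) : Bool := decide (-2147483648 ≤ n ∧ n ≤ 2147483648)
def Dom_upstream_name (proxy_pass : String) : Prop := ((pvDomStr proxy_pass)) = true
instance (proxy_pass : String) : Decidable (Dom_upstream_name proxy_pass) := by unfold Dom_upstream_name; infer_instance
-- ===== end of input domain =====

-- B replaces A's forward scheme-prefix strip plus two membership scans by a split at the
-- LAST ':' or '/' (rfind), accepting the tail iff the removed prefix is an allowed scheme (alternative, same cost).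

-- ===== PORT A =====
-- literal transliteration of A: the for-loop over ("http://","https://") with startswith/slice/break,
-- then the ":" not in u / "/" not in u / truthiness test; string ops ported on toList via PySem.Chars.
def upstream_name (proxy_pass : String) : String :=
  let u := proxy_pass.toList
  let u := if PySem.Chars.startswith u ("http://".toList) then PySem.List.slice u (some 7) none
           else if PySem.Chars.startswith u ("https://".toList) then PySem.List.slice u (some 8) none
           else u
  if PySem.Chars.isIn [':'] u = false ∧ PySem.Chars.isIn ['/'] u = false ∧ u ≠ [] then String.ofList u else ""

-- ===== PORT B =====
-- transliteration of Source B: cut = max(rfind(':'), rfind('/')) + 1; host = s[cut:];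
-- return host if host and s[:cut] in ("", "http://", "https://") else "".
def upstream_name_alt (proxy_pass : String) : String :=
  let s := proxy_pass.toList
  let cut : Int := max (PySem.Chars.rfind s [':']) (PySem.Chars.rfind s ['/']) + 1
  let host := PySem.List.slice s (some cut) none
  let pre := PySem.List.slice s none (some cut)
  if host ≠ [] ∧ (pre = [] ∨ pre = "http://".toList ∨ pre = "https://".toList)
  then String.ofList host else ""

-- ===== PRECONDITION & SPEC =====
def Spec_upstream_name (proxy_pass : String) (out : String) : Prop := out = upstream_name_alt proxy_pass
instance (proxy_pass : String) (out : String) : Decidable (Spec_upstream_name proxy_pass out) := by unfold Spec_upstream_name; infer_instance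

-- ===== CLAIM (what is proved, stated in full; the proofs are below) =====
def Claim_equal_upstream_name : Prop := ∀ (proxy_pass : String), Dom_upstream_name proxy_pass → Spec_upstream_name proxy_pass (upstream_name proxy_pass)

-- ===== LEMMAS AND PROOFS =====

theorem infix_singleton_iff {c : Char} {l : List Char} : [c] <:+: l ↔ c ∈ l := by
  constructor
  · rintro ⟨s, t, rfl⟩; simp
  · intro h
    obtain ⟨s, t, rfl⟩ := List.append_of_mem h
    exact ⟨s, t, by simp⟩

-- a cons-structured equivalent of PySem.Chars.rfind for a single-character needle
def lastIdx : List Char → Char → Int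
  | [], _ => -1
  | a :: t, c => if lastIdx t c ≥ 0 then lastIdx t c + 1 else if a = c then 0 else -1

theorem go_succ (t : List Char) (a c : Char) (k : Nat) :
    PySem.Chars.rfind.go (a :: t) [c] (k + 1)
      = if PySem.Chars.rfind.go t [c] k ≥ 0 then PySem.Chars.rfind.go t [c] k + 1
        else if [c].isPrefixOf (a :: t) then 0 else -1 := by
  induction k with
  | zero =>
    simp only [PySem.Chars.rfind.go, List.drop_succ_cons, List.drop_zero]
    split_ifs <;> simp_all
  | succ k ih =>
    show PySem.Chars.rfind.go (a :: t) [c] (k + 2) = _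
    have h1 : PySem.Chars.rfind.go (a :: t) [c] (k + 2)
        = if [c].isPrefixOf ((a :: t).drop (k + 2)) then ((k : Int) + 2) else PySem.Chars.rfind.go (a :: t) [c] (k + 1) := by
      simp only [PySem.Chars.rfind.go]
      norm_num
      split_ifs <;> rfl
    have h2 : PySem.Chars.rfind.go t [c] (k + 1)
        = if [c].isPrefixOf (t.drop (k + 1)) then ((k : Int) + 1) else PySem.Chars.rfind.go t [c] k := by
      simp only [PySem.Chars.rfind.go]; norm_num
    rw [h1, List.drop_succ_cons, h2]
    by_cases hp : [c].isPrefixOf (t.drop (k + 1))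
    · simp only [hp, if_true]
      rw [if_pos (by omega)]
      ring
    · simp only [hp]
      exact ih

theorem rfind_cons (t : List Char) (a c : Char) :
    PySem.Chars.rfind (a :: t) [c]
      = if PySem.Chars.rfind t [c] ≥ 0 then PySem.Chars.rfind t [c] + 1
        else if a = c then 0 else -1 := by
  have hgo : PySem.Chars.rfind t [c] = PySem.Chars.rfind.go t [c] t.length := rfl
  have hpre : [c].isPrefixOf (a :: t) = (a == c) := by
    simp [List.isPrefixOf, eq_comm]
  show PySem.Chars.rfind.go (a :: t) [c] (t.length + 1) = _
  rw [go_succ, ← hgo, hpre]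
  split_ifs <;> simp_all

theorem rfind_eq_lastIdx (s : List Char) (c : Char) :
    PySem.Chars.rfind s [c] = lastIdx s c := by
  induction s with
  | nil => rfl
  | cons a t ih => rw [rfind_cons, ih, lastIdx]

theorem lastIdx_bounds {s : List Char} {c : Char} (h : c ∈ s) :
    0 ≤ lastIdx s c ∧ lastIdx s c < s.length := by
  induction s with
  | nil => simp at h
  | cons a t ih =>
    rw [lastIdx]
    by_cases hm : c ∈ t
    · obtain ⟨h1, h2⟩ := ih hm
      rw [if_pos h1]
      refine ⟨by omega, ?_⟩
      simp only [List.length_cons]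
      push_cast
      omega
    · have ha : a = c := by rcases List.mem_cons.mp h with h | h; exact h.symm; exact absurd h hm
      have : lastIdx t c = -1 := by
        clear ih h ha
        induction t with
        | nil => rfl
        | cons b r ihr =>
          have hb : ¬ c ∈ r := fun hh => hm (List.mem_cons_of_mem _ hh)
          have hbc : ¬ b = c := fun hh => hm (by simp [hh])
          rw [lastIdx, ihr hb]
          simp [hbc]
      rw [this]
      simp [ha]

theorem lastIdx_not_mem {s : List Char} {c : Char} (h : c ∉ s) : lastIdx s c = -1 := by
  induction s with
  | nil => rfl
  | cons a t ih =>
    have ht : c ∉ t := fun hh => h (List.mem_cons_of_mem _ hh)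
    have ha : ¬ a = c := fun hh => h (by simp [hh])
    rw [lastIdx, ih ht]
    simp [ha]

theorem lastIdx_append_right {p t : List Char} {c : Char} (h : c ∈ t) :
    lastIdx (p ++ t) c = p.length + lastIdx t c := by
  induction p with
  | nil => simp
  | cons a q ih =>
    have hmem : c ∈ q ++ t := List.mem_append_right _ h
    have hb := lastIdx_bounds hmem
    rw [List.cons_append, lastIdx, ih, if_pos (by omega)]
    simp only [List.length_cons]
    push_cast
    ring

theorem lastIdx_append_not_right {p t : List Char} {c : Char} (h : c ∉ t) :
    lastIdx (p ++ t) c = lastIdx p c := by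
  induction p with
  | nil => simpa using lastIdx_not_mem h
  | cons a q ih =>
    rw [List.cons_append, lastIdx, ih, lastIdx]

-- A's final test equals "nonempty and every char differs from ':' and '/'"
theorem acond_iff (u : List Char) :
    (PySem.Chars.isIn [':'] u = false ∧ PySem.Chars.isIn ['/'] u = false ∧ u ≠ [])
      ↔ ((':' ∉ u) ∧ ('/' ∉ u) ∧ u ≠ []) := by
  simp only [PySem.Chars.isIn_eq_false_iff, infix_singleton_iff]

-- lastIdx is always < length and ≥ -1
theorem lastIdx_lt (s : List Char) (c : Char) : lastIdx s c < s.length := by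
  by_cases h : c ∈ s
  · exact (lastIdx_bounds h).2
  · rw [lastIdx_not_mem h]
    omega

-- the common argument for the two scheme-prefix cases: on s = P ++ suf (P the matched scheme),
-- A's final test on suf equals B's rfind-split expression on the whole string
theorem scheme_case (P suf : List Char)
    (hP : P = "http://".toList ∨ P = "https://".toList) :
    (if PySem.Chars.isIn [':'] suf = false ∧ PySem.Chars.isIn ['/'] suf = false ∧ suf ≠ []
     then String.ofList suf else "")
    = (if PySem.List.slice (P ++ suf) (some (max (lastIdx (P ++ suf) ':') (lastIdx (P ++ suf) '/') + 1)) none ≠ [] ∧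
          (PySem.List.slice (P ++ suf) none (some (max (lastIdx (P ++ suf) ':') (lastIdx (P ++ suf) '/') + 1)) = [] ∨
           PySem.List.slice (P ++ suf) none (some (max (lastIdx (P ++ suf) ':') (lastIdx (P ++ suf) '/') + 1)) = "http://".toList ∨
           PySem.List.slice (P ++ suf) none (some (max (lastIdx (P ++ suf) ':') (lastIdx (P ++ suf) '/') + 1)) = "https://".toList)
       then String.ofList (PySem.List.slice (P ++ suf) (some (max (lastIdx (P ++ suf) ':') (lastIdx (P ++ suf) '/') + 1)) none)
       else "") := by
  have hPc : lastIdx P ':' < (P.length : Int) ∧ lastIdx P '/' < (P.length : Int) ∧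
      max (lastIdx P ':') (lastIdx P '/') + 1 = (P.length : Int) := by
    rcases hP with rfl | rfl <;> exact ⟨by decide, by decide, by decide⟩
  by_cases hc : ':' ∈ suf ∨ '/' ∈ suf
  · -- dirty tail: both sides return ""
    have hA : ¬ (PySem.Chars.isIn [':'] suf = false ∧ PySem.Chars.isIn ['/'] suf = false ∧ suf ≠ []) := by
      rw [acond_iff]; tauto
    rw [if_neg hA]
    have hub : ∀ c : Char, lastIdx P c < (P.length : Int) →
        lastIdx (P ++ suf) c < ((P.length : Int) + suf.length) := by
      intro c hcP
      by_cases hm : c ∈ suf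
      · rw [lastIdx_append_right hm]
        have := (lastIdx_bounds hm).2
        omega
      · rw [lastIdx_append_not_right hm]
        omega
    have hub1 := hub ':' hPc.1
    have hub2 := hub '/' hPc.2.1
    have hlb : (P.length : Int) ≤ max (lastIdx (P ++ suf) ':') (lastIdx (P ++ suf) '/') := by
      rcases hc with h | h
      · refine le_trans ?_ (le_max_left _ _)
        rw [lastIdx_append_right h]
        have := (lastIdx_bounds h).1
        omega
      · refine le_trans ?_ (le_max_right _ _)
        rw [lastIdx_append_right h]
        have := (lastIdx_bounds h).1
        omega
    set m : Int := max (lastIdx (P ++ suf) ':') (lastIdx (P ++ suf) '/') with hm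
    have h0m : 0 ≤ m + 1 := by omega
    rw [PySem.List.slice_from _ h0m, PySem.List.slice_to _ h0m]
    have hlen : ((P ++ suf).length : Int) = (P.length : Int) + suf.length := by
      push_cast [List.length_append]
      ring
    have hcutlen : (m + 1).toNat ≤ (P ++ suf).length := by omega
    have hcutlb : P.length < (m + 1).toNat := by omega
    have hprelen : (List.take (m + 1).toNat (P ++ suf)).length = (m + 1).toNat := by
      rw [List.length_take]
      omega
    have hB : ¬ (List.take (m + 1).toNat (P ++ suf) = [] ∨
        List.take (m + 1).toNat (P ++ suf) = "http://".toList ∨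
        List.take (m + 1).toNat (P ++ suf) = "https://".toList) := by
      have hexQ : ∀ Q : List Char, Q = "http://".toList ∨ Q = "https://".toList →
          List.take (m + 1).toNat (P ++ suf) ≠ Q := by
        intro Q hQ heq
        have hQpre : Q <+: P ++ suf := heq ▸ List.take_prefix _ _
        have hQlen : P.length < Q.length := by rw [← heq, hprelen]; exact hcutlb
        have hPQ : P <+: Q :=
          List.prefix_of_prefix_length_le (List.prefix_append _ _) hQpre (le_of_lt hQlen)
        rcases hP with rfl | rfl <;> rcases hQ with rfl | rfl <;> revert hPQ hQlen <;> decide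
      rintro (h | h | h)
      · have := hprelen
        rw [h] at this
        simp at this
        omega
      · exact hexQ _ (Or.inl rfl) h
      · exact hexQ _ (Or.inr rfl) h
    rw [if_neg (fun hh => hB hh.2)]
  · -- clean tail: cut lands exactly at the scheme boundary
    rw [not_or] at hc
    rw [lastIdx_append_not_right hc.1, lastIdx_append_not_right hc.2, hPc.2.2]
    have h0 : (0:Int) ≤ (P.length : Int) := by omega
    rw [PySem.List.slice_from _ h0, PySem.List.slice_to _ h0]
    have htn : ((P.length : Int)).toNat = P.length := Int.toNat_natCast _
    rw [htn, List.drop_left' rfl, List.take_left' rfl]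
    by_cases hsuf : suf = []
    · rw [if_neg (by rw [acond_iff]; tauto), if_neg (by tauto)]
    · rw [if_pos, if_pos]
      · exact ⟨hsuf, Or.inr hP⟩
      · rw [acond_iff]
        exact ⟨hc.1, hc.2, hsuf⟩

theorem upstream_name_spec' (proxy_pass : String) :
    upstream_name proxy_pass = upstream_name_alt proxy_pass := by
  unfold upstream_name upstream_name_alt
  dsimp only
  simp only [rfind_eq_lastIdx]
  by_cases h7 : PySem.Chars.startswith proxy_pass.toList ("http://".toList)
  · obtain ⟨suf, hsuf⟩ := (PySem.Chars.startswith_iff _ _).mp h7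
    simp only [h7, if_true]
    rw [← hsuf]
    have hdrop : PySem.List.slice ("http://".toList ++ suf) (some 7) none = suf := by
      rw [PySem.List.slice_from _ (by norm_num)]
      simp
    rw [hdrop]
    exact scheme_case _ suf (Or.inl rfl)
  · by_cases h8 : PySem.Chars.startswith proxy_pass.toList ("https://".toList)
    · obtain ⟨suf, hsuf⟩ := (PySem.Chars.startswith_iff _ _).mp h8
      simp only [h7, h8, if_true, if_false, Bool.false_eq_true]
      rw [← hsuf]
      have hdrop : PySem.List.slice ("https://".toList ++ suf) (some 8) none = suf := by
        rw [PySem.List.slice_from _ (by norm_num)]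
        simp
      rw [hdrop]
      exact scheme_case _ suf (Or.inr rfl)
    · simp only [h7, h8, if_false, Bool.false_eq_true]
      by_cases hc : ':' ∈ proxy_pass.toList ∨ '/' ∈ proxy_pass.toList
      · -- some separator occurs, no scheme prefix: both sides return ""
        rw [if_neg (by rw [acond_iff]; tauto)]
        set s := proxy_pass.toList with hs
        have hmlb : (0:Int) ≤ max (lastIdx s ':') (lastIdx s '/') := by
          rcases hc with h | h
          · exact le_trans (lastIdx_bounds h).1 (le_max_left _ _)
          · exact le_trans (lastIdx_bounds h).1 (le_max_right _ _)
        have hmub : max (lastIdx s ':') (lastIdx s '/') < (s.length : Int) :=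
          max_lt (lastIdx_lt s ':') (lastIdx_lt s '/')
        set m : Int := max (lastIdx s ':') (lastIdx s '/') with hm
        rw [PySem.List.slice_from _ (by omega), PySem.List.slice_to _ (by omega)]
        have hprelen : (List.take (m + 1).toNat s).length = (m + 1).toNat := by
          rw [List.length_take]
          omega
        have hpre : ∀ Q : List Char, List.take (m + 1).toNat s = Q →
            PySem.Chars.startswith s Q = true := by
          intro Q heq
          rw [PySem.Chars.startswith_iff]
          exact heq ▸ List.take_prefix _ _
        rw [if_neg]
        rintro ⟨-, (h | h | h)⟩
        · rw [h] at hprelen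
          simp at hprelen
          omega
        · exact h7 (hpre _ h)
        · exact h8 (hpre _ h)
      · -- no separator at all: cut = 0, host is the whole string
        rw [not_or] at hc
        rw [lastIdx_not_mem hc.1, lastIdx_not_mem hc.2]
        norm_num
        rw [PySem.List.slice_to _ le_rfl]
        simp only [Int.toNat_zero, List.take_zero]
        by_cases hs : proxy_pass = ""
        · simp [hs]
        · have a1 : PySem.Chars.isIn [':'] proxy_pass.toList = false := by
            rw [PySem.Chars.isIn_eq_false_iff, infix_singleton_iff]
            exact hc.1
          have a2 : PySem.Chars.isIn ['/'] proxy_pass.toList = false := by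
            rw [PySem.Chars.isIn_eq_false_iff, infix_singleton_iff]
            exact hc.2
          rw [if_pos ⟨a1, a2, hs⟩, if_pos ⟨hs, Or.inl (by trivial)⟩]

-- ===== VERDICT (by name: the statement is the Claim_ definition above) =====
theorem upstream_name_spec : Claim_equal_upstream_name := by
  intro p _
  exact upstream_name_spec' p
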